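-- pv_equiv track=rewrite | github.com/raghu1199/DS-ALGO-COMPTETIVE_CODING- | COMPETETIVE_CODES/DSASHEET/arr2.py | makeArrsortByremoveOne
-- ===== SOURCE A (Python) =====
-- def makeArrsortByremoveOne(arr):
--     n=len(arr)
--     cnt=0
--     for i in range(1,n):
--         if arr[i-1]>arr[i]:
--             # cnt already 1 or 2 means 1 item alreday deleted so now impossible to make arr sort
--             # bcz we only have to delete 1 item
--             if cnt!=0:
--                 return 0
--             # try to remove left of i arr(i-1) or if i==1 and 9 5 8 so in this 9 must removed
--             # 1 3 8 5 9
--             if i==1 or arr[i-2]<=arr[i]: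
--                 cnt+=1
--             # try to delete ele itself 3 4 5 2 6
--             if i==n-1 or arr[i-1]<=arr[i+1]:
--                 cnt+=1
--             if cnt==0: #if sucjh pair exit nd we cant remove then impossile 2 2 1 1
--                 return 0
--     # if no such pair exist means it already sorted order so u can remove any 1 item
--     if cnt==0:
--         return len(arr)
--     else:
--         return cnt
-- ===== SOURCE B (Python) =====
-- def makeArrsortByremoveOne(arr):
--     cnt = 0
--     for j in range(len(arr)):
--         rest = arr[:j] + arr[j+1:]
--         if all(x <= y for x, y in zip(rest, rest[1:])):
--             cnt += 1
--     return cnt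
-- ===== Notes on version B (the rewrite author's own statement) =====
-- stated objective: simpler
-- what changed: B replaces A's single-pass scan with early returns and case analysis on the first descent by the naive definition: count, for each index j, whether deleting arr[j] leaves a non-decreasing list.
import Mathlib
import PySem

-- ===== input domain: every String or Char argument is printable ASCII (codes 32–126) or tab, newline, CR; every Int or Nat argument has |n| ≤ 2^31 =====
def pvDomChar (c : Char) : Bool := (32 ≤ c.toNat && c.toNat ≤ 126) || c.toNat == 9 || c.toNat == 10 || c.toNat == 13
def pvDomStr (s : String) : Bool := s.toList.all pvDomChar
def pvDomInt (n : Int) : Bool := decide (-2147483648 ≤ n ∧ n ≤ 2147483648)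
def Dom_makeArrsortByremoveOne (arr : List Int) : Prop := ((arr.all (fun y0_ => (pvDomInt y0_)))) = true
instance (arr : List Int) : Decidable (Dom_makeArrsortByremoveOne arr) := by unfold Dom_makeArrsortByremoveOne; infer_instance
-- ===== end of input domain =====

-- B replaces A's single clever scan (with early returns) by the naive count, over each index j,
-- of whether deleting arr[j] leaves a non-decreasing list (objective: simpler; not faster).

-- ===== PORT A =====
-- arr[i] with a possibly negative index, default irrelevant (all reads guarded in range by the loop)
def pvGD (arr : List Int) (i : Int) : Int := PySem.List.pyGetD arr i 0

-- the 'for i in range(1, n)' loop with its early returns; cnt is the running counter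
def pvLoopA (arr : List Int) (n : Int) : List Int → Int → Int
  | [], cnt => if cnt = 0 then PySem.List.len arr else cnt
  | i :: rest, cnt =>
    if pvGD arr (i - 1) > pvGD arr i then
      if cnt ≠ 0 then 0
      else
        let cnt1 : Int := if i = 1 ∨ pvGD arr (i - 2) ≤ pvGD arr i then cnt + 1 else cnt
        let cnt2 : Int := if i = n - 1 ∨ pvGD arr (i - 1) ≤ pvGD arr (i + 1) then cnt1 + 1 else cnt1
        if cnt2 = 0 then 0 else pvLoopA arr n rest cnt2
    else pvLoopA arr n rest cnt

def makeArrsortByremoveOne (arr : List Int) : Int :=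
  pvLoopA arr (PySem.List.len arr) (PySem.List.pyRange 1 (PySem.List.len arr) 1) 0

-- ===== PORT B =====
-- all(x <= y for x, y in zip(rest, rest[1:]))
def pvSortedPairs (rest : List Int) : Bool :=
  (rest.zip (PySem.List.slice rest (some 1) none)).all (fun xy => xy.1 ≤ xy.2)

def makeArrsortByremoveOne_alt (arr : List Int) : Int :=
  (PySem.List.pyRange 0 (PySem.List.len arr) 1).foldl
    (fun cnt j =>
      if pvSortedPairs (PySem.List.slice arr none (some j) ++ PySem.List.slice arr (some (j + 1)) none)
      then cnt + 1 else cnt) 0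

-- ===== PRECONDITION & SPEC =====
def Spec_makeArrsortByremoveOne (arr : List Int) (out : Int) : Prop := out = makeArrsortByremoveOne_alt arr
instance (arr : List Int) (out : Int) : Decidable (Spec_makeArrsortByremoveOne arr out) := by unfold Spec_makeArrsortByremoveOne; infer_instance

-- ===== CLAIM (what is proved, stated in full; the proofs are below) =====
def Claim_equal_makeArrsortByremoveOne : Prop := ∀ (arr : List Int), Dom_makeArrsortByremoveOne arr → Spec_makeArrsortByremoveOne arr (makeArrsortByremoveOne arr)

-- ===== LEMMAS AND PROOFS =====

-- B's per-index test, as a predicate on the Int loop index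
def pvB (arr : List Int) (j : Int) : Bool :=
  pvSortedPairs (PySem.List.slice arr none (some j) ++ PySem.List.slice arr (some (j + 1)) none)

-- the same test with a Nat index
def pvOk (arr : List Int) (j : Nat) : Bool := pvSortedPairs (arr.take j ++ arr.drop (j + 1))

-- adjacent pair (k, k+1) is in order
def pvAsc (arr : List Int) (k : Nat) : Prop := arr.getD k 0 ≤ arr.getD (k + 1) 0

lemma pvB_eq_pvOk (arr : List Int) (j : Int) (h0 : 0 ≤ j) :
    pvB arr j = pvOk arr j.toNat := by
  unfold pvB pvOk
  rw [PySem.List.slice_to arr h0, PySem.List.slice_from arr (by omega : (0:Int) ≤ j + 1),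
    show (j + 1).toNat = j.toNat + 1 from by omega]

lemma alt_eq_countP (arr : List Int) :
    makeArrsortByremoveOne_alt arr
      = ((PySem.List.pyRange 0 (arr.length : Int) 1).countP (pvB arr) : Int) := by
  unfold makeArrsortByremoveOne_alt
  rw [PySem.List.len_eq]
  rw [show (fun (cnt : Int) (j : Int) =>
      if pvSortedPairs (PySem.List.slice arr none (some j) ++ PySem.List.slice arr (some (j + 1)) none)
      then cnt + 1 else cnt) = fun (cnt : Int) (j : Int) => if pvB arr j then cnt + 1 else cnt from rfl]
  rw [PySem.List.foldl_if_add_one (pvB arr)]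
  simp

lemma sortedPairs_iff (l : List Int) :
    pvSortedPairs l = true ↔ ∀ k : Nat, k + 1 < l.length → l.getD k 0 ≤ l.getD (k + 1) 0 := by
  unfold pvSortedPairs
  rw [PySem.List.slice_from l (by omega : (0:Int) ≤ 1), List.all_eq_true]
  constructor
  · intro h k hk
    have hlen : k < (l.zip (l.drop (1:Int).toNat)).length := by
      simp [List.length_zip]; omega
    have h2 := h _ (List.getElem_mem hlen)
    rw [List.getElem_zip] at h2
    simp only [List.getElem_drop, decide_eq_true_eq] at h2
    rw [List.getD_eq_getElem l 0 (by omega), List.getD_eq_getElem l 0 hk]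
    simpa [Nat.add_comm] using h2
  · intro h xy hxy
    obtain ⟨k, hk, rfl⟩ := List.mem_iff_getElem.1 hxy
    rw [List.getElem_zip]
    simp only [List.getElem_drop, decide_eq_true_eq]
    have hk' : k + 1 < l.length := by
      simp [List.length_zip] at hk; omega
    have h2 := h k hk'
    rw [List.getD_eq_getElem l 0 (by omega), List.getD_eq_getElem l 0 hk'] at h2
    simpa [Nat.add_comm] using h2

lemma getD_erase (arr : List Int) (j k : Nat) :
    (arr.take j ++ arr.drop (j + 1)).getD k 0
      = if k < j then arr.getD k 0 else arr.getD (k + 1) 0 := by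
  rw [← List.eraseIdx_eq_take_drop_succ, List.getD_eq_getElem?_getD, List.getElem?_eraseIdx]
  split <;> rw [List.getD_eq_getElem?_getD]

lemma len_erase (arr : List Int) (j : Nat) (hj : j < arr.length) :
    (arr.take j ++ arr.drop (j + 1)).length = arr.length - 1 := by
  rw [← List.eraseIdx_eq_take_drop_succ]; exact List.length_eraseIdx_of_lt hj

lemma ok_iff (arr : List Int) (j : Nat) (hj : j < arr.length) :
    pvOk arr j = true ↔
      ((∀ k, k + 1 < arr.length → k ≠ j → k + 1 ≠ j → pvAsc arr k) ∧
       (1 ≤ j → j + 1 < arr.length → arr.getD (j - 1) 0 ≤ arr.getD (j + 1) 0)) := by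
  unfold pvOk
  rw [sortedPairs_iff]
  have hlen := len_erase arr j hj
  rw [hlen]
  constructor
  · intro H
    have H' : ∀ k, k + 1 < arr.length - 1 →
        (if k < j then arr.getD k 0 else arr.getD (k+1) 0) ≤
        (if k + 1 < j then arr.getD (k+1) 0 else arr.getD (k+2) 0) := by
      intro k hk
      have h2 := H k hk
      rwa [getD_erase, getD_erase] at h2
    constructor
    · intro k hk hkj hk1j
      unfold pvAsc
      rcases Nat.lt_or_ge (k+1) j with hlt | hge
      · have h2 := H' k (by omega)
        rwa [if_pos (by omega), if_pos hlt] at h2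
      · have hkgt : j < k := by omega
        have h2 := H' (k-1) (by omega)
        rw [if_neg (by omega), if_neg (by omega),
          show k - 1 + 1 = k from by omega, show k - 1 + 2 = k + 1 from by omega] at h2
        exact h2
    · intro h1 hj1
      have h2 := H' (j-1) (by omega)
      rwa [if_pos (by omega), if_neg (by omega),
        show j - 1 + 2 = j + 1 from by omega] at h2
  · rintro ⟨Ha, Hb⟩ k hk
    rw [getD_erase, getD_erase]
    split_ifs with h1 h2 h2
    · exact Ha k (by omega) (by omega) (by omega)
    · -- k < j, ¬(k+1 < j)  so k+1 = j
      have hkj : k + 1 = j := by omega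
      have h3 := Hb (by omega) (by omega)
      rwa [show j - 1 = k from by omega, show j + 1 = k + 1 + 1 from by omega] at h3
    · omega
    · exact Ha (k+1) (by omega) (by omega) (by omega)

lemma ok_all (arr : List Int) (h : ∀ k, k + 1 < arr.length → pvAsc arr k)
    (j : Nat) (hj : j < arr.length) : pvOk arr j = true := by
  rw [ok_iff arr j hj]
  refine ⟨fun k hk _ _ => h k hk, fun h1 hj1 => ?_⟩
  have h2 := h (j-1) (by omega)
  unfold pvAsc at h2
  rw [show j - 1 + 1 = j from by omega] at h2
  exact le_trans h2 (h j hj1)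

lemma ok_one (arr : List Int) (d : Nat) (hd : d + 1 < arr.length) (hdes : ¬ pvAsc arr d)
    (hother : ∀ k, k + 1 < arr.length → k ≠ d → pvAsc arr k)
    (j : Nat) (hj : j < arr.length) :
    pvOk arr j = true ↔
      ((j = d ∧ (d = 0 ∨ arr.getD (d - 1) 0 ≤ arr.getD (d + 1) 0)) ∨
       (j = d + 1 ∧ (d + 2 = arr.length ∨ arr.getD d 0 ≤ arr.getD (d + 2) 0))) := by
  rw [ok_iff arr j hj]
  constructor
  · rintro ⟨Ha, Hb⟩
    have hjd : j = d ∨ j = d + 1 := by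
      by_contra hc
      push_neg at hc
      exact hdes (Ha d hd (by omega) (by omega))
    rcases hjd with h | h
    · refine Or.inl ⟨h, ?_⟩
      rw [← h]
      rcases Nat.eq_zero_or_pos j with h0 | h0
      · exact Or.inl h0
      · exact Or.inr (Hb (by omega) (by omega))
    · refine Or.inr ⟨h, ?_⟩
      rcases Nat.lt_or_ge (d+2) arr.length with hlt | hge
      · refine Or.inr ?_
        have h3 := Hb (by omega) (by omega)
        rwa [h, show d + 1 - 1 = d from by omega, show d + 1 + 1 = d + 2 from rfl] at h3
      · exact Or.inl (by omega)
  · rintro (⟨rfl, hc⟩ | ⟨rfl, hc⟩)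
    · refine ⟨fun k hk hkj _ => hother k hk hkj, fun h1 hj1 => ?_⟩
      rcases hc with h0 | h0
      · omega
      · exact h0
    · refine ⟨fun k hk _ hk1j => hother k hk (by omega), fun h1 hj1 => ?_⟩
      rcases hc with h0 | h0
      · omega
      · rwa [show d + 1 - 1 = d from by omega, show d + 1 + 1 = d + 2 from rfl]

lemma ok_two (arr : List Int) (d1 d2 : Nat)
    (hd1 : d1 + 1 < arr.length) (hdes1 : ¬ pvAsc arr d1)
    (hd2 : d2 + 1 < arr.length) (hdes2 : ¬ pvAsc arr d2) (hlt : d1 < d2)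
    (j : Nat) (hj : j < arr.length) : pvOk arr j = false := by
  rw [Bool.eq_false_iff]
  intro hok
  rw [ok_iff arr j hj] at hok
  obtain ⟨Ha, Hb⟩ := hok
  have h1 : j = d1 ∨ j = d1 + 1 := by
    by_contra hc; push_neg at hc
    exact hdes1 (Ha d1 hd1 (by omega) (by omega))
  have h2 : j = d2 ∨ j = d2 + 1 := by
    by_contra hc; push_neg at hc
    exact hdes2 (Ha d2 hd2 (by omega) (by omega))
  have hd21 : d2 = d1 + 1 ∧ j = d1 + 1 := by omega
  obtain ⟨rfl, rfl⟩ : d2 = d1 + 1 ∧ j = d1 + 1 := hd21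
  have h3 := Hb (by omega) (by omega)
  rw [show d1 + 1 - 1 = d1 from by omega] at h3
  unfold pvAsc at hdes1 hdes2
  omega

lemma pvGD_nonneg (arr : List Int) (i : Int) (h0 : 0 ≤ i) :
    pvGD arr i = arr.getD i.toNat 0 := by
  unfold pvGD
  exact PySem.List.pyGetD_of_nonneg arr 0 h0

lemma asc_pvGD (arr : List Int) (i : Int) (h1 : 1 ≤ i) (hasc : pvAsc arr (i.toNat - 1)) :
    pvGD arr (i - 1) ≤ pvGD arr i := by
  rw [pvGD_nonneg arr (i-1) (by omega), pvGD_nonneg arr i (by omega)]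
  unfold pvAsc at hasc
  rw [show (i-1).toNat = i.toNat - 1 from by omega]
  rwa [show i.toNat - 1 + 1 = i.toNat from by omega] at hasc

lemma desc_pvGD (arr : List Int) (i : Int) (h1 : 1 ≤ i) (hdes : ¬ pvAsc arr (i.toNat - 1)) :
    pvGD arr i < pvGD arr (i - 1) := by
  rw [pvGD_nonneg arr (i-1) (by omega), pvGD_nonneg arr i (by omega)]
  unfold pvAsc at hdes
  rw [show (i-1).toNat = i.toNat - 1 from by omega]
  rw [show i.toNat - 1 + 1 = i.toNat from by omega] at hdes
  omega

lemma loopA_no_descent (arr : List Int) (K : Nat) :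
    ∀ (m cnt : Int), ((arr.length : Int) - m).toNat ≤ K → 1 ≤ m →
    (∀ i : Int, m ≤ i → i < (arr.length : Int) → pvGD arr (i - 1) ≤ pvGD arr i) →
    pvLoopA arr (arr.length : Int) (PySem.List.pyRange m (arr.length : Int) 1) cnt
      = if cnt = 0 then (arr.length : Int) else cnt := by
  induction K with
  | zero =>
    intro m cnt hK h1 h
    rw [PySem.List.pyRange_one_eq_nil (by omega)]
    simp [pvLoopA]
  | succ K ih =>
    intro m cnt hK h1 h
    by_cases hnm : (arr.length : Int) ≤ m
    · rw [PySem.List.pyRange_one_eq_nil hnm]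
      simp [pvLoopA]
    · push_neg at hnm
      rw [PySem.List.pyRange_one_cons hnm]
      simp only [pvLoopA]
      rw [if_neg (not_lt.2 (h m le_rfl hnm))]
      exact ih (m+1) cnt (by omega) (by omega) (fun i hi h2 => h i (by omega) h2)

lemma loopA_second_descent (arr : List Int) (K : Nat) :
    ∀ (m cnt : Int), ((arr.length : Int) - m).toNat ≤ K → 1 ≤ m → cnt ≠ 0 →
    (∃ i : Int, m ≤ i ∧ i < (arr.length : Int) ∧ pvGD arr i < pvGD arr (i - 1)) →
    pvLoopA arr (arr.length : Int) (PySem.List.pyRange m (arr.length : Int) 1) cnt = 0 := by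
  induction K with
  | zero =>
    intro m cnt hK h1 hcnt ⟨i, hi1, hi2, _⟩
    omega
  | succ K ih =>
    intro m cnt hK h1 hcnt hex
    obtain ⟨i, hi1, hi2, hdes⟩ := hex
    rw [PySem.List.pyRange_one_cons (by omega)]
    simp only [pvLoopA]
    by_cases hm : pvGD arr m < pvGD arr (m - 1)
    · rw [if_pos hm, if_pos hcnt]
    · rw [if_neg hm]
      have him : i ≠ m := by rintro rfl; exact hm hdes
      exact ih (m+1) cnt (by omega) (by omega) hcnt ⟨i, by omega, hi2, hdes⟩

lemma loopA_skip (arr : List Int) (K : Nat) :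
    ∀ (m m' cnt : Int), (m' - m).toNat ≤ K → 1 ≤ m → m ≤ m' → m' ≤ (arr.length : Int) →
    (∀ i : Int, m ≤ i → i < m' → pvGD arr (i - 1) ≤ pvGD arr i) →
    pvLoopA arr (arr.length : Int) (PySem.List.pyRange m (arr.length : Int) 1) cnt
      = pvLoopA arr (arr.length : Int) (PySem.List.pyRange m' (arr.length : Int) 1) cnt := by
  induction K with
  | zero =>
    intro m m' cnt hK h1 hmm hmn h
    rw [show m' = m from by omega]
  | succ K ih =>
    intro m m' cnt hK h1 hmm hmn h
    by_cases heq : m' ≤ m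
    · rw [show m' = m from by omega]
    · push_neg at heq
      rw [PySem.List.pyRange_one_cons (by omega : m < (arr.length : Int))]
      simp only [pvLoopA]
      rw [if_neg (not_lt.2 (h m le_rfl heq))]
      exact ih (m+1) m' cnt (by omega) (by omega) (by omega) hmn
        (fun i hi h2 => h i (by omega) h2)

lemma pvGD_natCast (arr : List Int) (k : Nat) : pvGD arr (k : Int) = arr.getD k 0 := by
  unfold pvGD
  rw [PySem.List.pyGetD_natCast]

lemma main_eq (arr : List Int) : makeArrsortByremoveOne arr = makeArrsortByremoveOne_alt arr := by
  have halt := alt_eq_countP arr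
  unfold makeArrsortByremoveOne
  rw [PySem.List.len_eq]
  by_cases hall : ∀ k, k + 1 < arr.length → pvAsc arr k
  · -- no descent at all: A returns len(arr), B counts every index
    rw [loopA_no_descent arr ((arr.length : Int) - 1).toNat 1 0 (by omega) (by omega)
      (fun i hi h2 => asc_pvGD arr i hi (hall (i.toNat - 1) (by omega)))]
    rw [halt, List.countP_eq_length.2 (fun j hj => ?_), PySem.List.length_pyRange_one]
    · simp
    · have hj' := PySem.List.mem_pyRange_one.1 hj
      rw [pvB_eq_pvOk arr j (by omega)]
      exact ok_all arr hall j.toNat (by omega)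
  · push_neg at hall
    obtain ⟨k0, hk0, hk0d⟩ := hall
    have hex : ∃ k, k + 1 < arr.length ∧ ¬ pvAsc arr k := ⟨k0, hk0, hk0d⟩
    classical
    set d := Nat.find hex with hdef
    obtain ⟨hd1, hdes⟩ : d + 1 < arr.length ∧ ¬ pvAsc arr d := Nat.find_spec hex
    have hmin : ∀ k, k < d → ¬ (k + 1 < arr.length ∧ ¬ pvAsc arr k) :=
      fun k hk => Nat.find_min hex hk
    -- A: skip the ascending prefix up to the first descent at loop index d+1
    have hpre : ∀ i : Int, 1 ≤ i → i < (d : Int) + 1 → pvGD arr (i - 1) ≤ pvGD arr i := by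
      intro i hi1 hi2
      refine asc_pvGD arr i hi1 ?_
      have h2 := hmin (i.toNat - 1) (by omega)
      have h3 : i.toNat - 1 + 1 < arr.length := by omega
      tauto
    rw [loopA_skip arr ((d : Int) + 1 - 1).toNat 1 ((d : Int) + 1) 0 (by omega) (by omega)
      (by omega) (by omega) hpre]
    rw [PySem.List.pyRange_one_cons (by omega : (d : Int) + 1 < (arr.length : Int))]
    simp only [pvLoopA]
    have hgdes : pvGD arr ((d : Int) + 1) < pvGD arr ((d : Int) + 1 - 1) := by
      refine desc_pvGD arr ((d : Int) + 1) (by omega) ?_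
      rwa [show ((d : Int) + 1).toNat - 1 = d from by omega]
    rw [if_pos hgdes, if_neg (by simp : ¬ (0 : Int) ≠ 0)]
    -- the two removal conditions, translated to Nat indices
    have hc1 : ((d : Int) + 1 = 1 ∨ pvGD arr ((d : Int) + 1 - 2) ≤ pvGD arr ((d : Int) + 1)) ↔
        (d = 0 ∨ arr.getD (d - 1) 0 ≤ arr.getD (d + 1) 0) := by
      by_cases h0 : d = 0
      · rw [h0]; norm_num
      · have e1 : (d : Int) + 1 - 2 = ((d - 1 : Nat) : Int) := by omega
        have e2 : (d : Int) + 1 = ((d + 1 : Nat) : Int) := by omega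
        rw [e1, e2, pvGD_natCast, pvGD_natCast]
        constructor
        · rintro (h | h)
          · omega
          · exact Or.inr h
        · rintro (h | h)
          · omega
          · exact Or.inr h
    have hc2 : ((d : Int) + 1 = (arr.length : Int) - 1 ∨
          pvGD arr ((d : Int) + 1 - 1) ≤ pvGD arr ((d : Int) + 1 + 1)) ↔
        (d + 2 = arr.length ∨ arr.getD d 0 ≤ arr.getD (d + 2) 0) := by
      by_cases h2 : d + 2 = arr.length
      · constructor
        · intro _; exact Or.inl h2
        · intro _; exact Or.inl (by omega)
      · have e1 : (d : Int) + 1 - 1 = ((d : Nat) : Int) := by omega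
        have e2 : (d : Int) + 1 + 1 = ((d + 2 : Nat) : Int) := by omega
        rw [e1, e2, pvGD_natCast, pvGD_natCast]
        constructor
        · rintro (h | h)
          · omega
          · exact Or.inr h
        · rintro (h | h)
          · omega
          · exact Or.inr h
    by_cases htwo : ∃ k, (k + 1 < arr.length ∧ ¬ pvAsc arr k) ∧ k ≠ d
    · -- at least two descents: both sides are 0
      obtain ⟨d2, ⟨hd2, hdes2⟩, hne⟩ := htwo
      have hlt : d < d2 := by
        rcases Nat.lt_or_ge d2 d with h | h
        · exact absurd ⟨hd2, hdes2⟩ (hmin d2 h)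
        · omega
      have hB : makeArrsortByremoveOne_alt arr = 0 := by
        rw [halt, List.countP_eq_zero.2 (fun j hj => ?_)]
        · simp
        · have hj' := PySem.List.mem_pyRange_one.1 hj
          rw [pvB_eq_pvOk arr j (by omega)]
          simp [ok_two arr d d2 hd1 hdes hd2 hdes2 hlt j.toNat (by omega)]
      rw [hB]
      have htail : ∀ cnt : Int, cnt ≠ 0 →
          pvLoopA arr (arr.length : Int)
            (PySem.List.pyRange ((d : Int) + 1 + 1) (arr.length : Int) 1) cnt = 0 := by
        intro cnt hcnt
        refine loopA_second_descent arr ((arr.length : Int)).toNat ((d : Int) + 1 + 1) cnt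
          (by omega) (by omega) hcnt ⟨((d2 : Int)) + 1, by omega, by omega, ?_⟩
        refine desc_pvGD arr ((d2 : Int) + 1) (by omega) ?_
        rwa [show ((d2 : Int) + 1).toNat - 1 = d2 from by omega]
      by_cases hC1 : d = 0 ∨ arr.getD (d - 1) 0 ≤ arr.getD (d + 1) 0 <;>
        by_cases hC2 : d + 2 = arr.length ∨ arr.getD d 0 ≤ arr.getD (d + 2) 0
      · rw [if_pos (hc1.2 hC1), if_pos (hc2.2 hC2)]
        rw [if_neg (by norm_num : ¬ (0 : Int) + 1 + 1 = 0)]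
        exact htail _ (by norm_num)
      · rw [if_pos (hc1.2 hC1), if_neg (fun h => hC2 (hc2.1 h))]
        rw [if_neg (by norm_num : ¬ (0 : Int) + 1 = 0)]
        exact htail _ (by norm_num)
      · rw [if_neg (fun h => hC1 (hc1.1 h)), if_pos (hc2.2 hC2)]
        rw [if_neg (by norm_num : ¬ (0 : Int) + 1 = 0)]
        exact htail _ (by norm_num)
      · rw [if_neg (fun h => hC1 (hc1.1 h)), if_neg (fun h => hC2 (hc2.1 h))]
        rw [if_pos rfl]
    · -- exactly one descent, at pair d
      have hother : ∀ k, k + 1 < arr.length → k ≠ d → pvAsc arr k := by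
        intro k hk hkd
        by_contra hc
        exact htwo ⟨k, ⟨hk, hc⟩, hkd⟩
      -- B: only indices d and d+1 can count
      have hsplit : PySem.List.pyRange 0 (arr.length : Int) 1
          = PySem.List.pyRange 0 (d : Int) 1 ++
            ((d : Int) :: [(d : Int) + 1]) ++
            PySem.List.pyRange ((d : Int) + 2) (arr.length : Int) 1 := by
        rw [PySem.List.pyRange_one_append 0 ((d : Int)) (arr.length : Int) (by omega) (by omega),
          PySem.List.pyRange_one_append ((d : Int)) ((d : Int) + 2) (arr.length : Int)
            (by omega) (by omega),
          PySem.List.pyRange_one_cons (by omega : (d : Int) < (d : Int) + 2),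
          show (d : Int) + 2 = ((d : Int) + 1) + 1 from by ring,
          PySem.List.pyRange_one_singleton]
        rw [List.append_assoc]
      have hleft : (PySem.List.pyRange 0 (d : Int) 1).countP (pvB arr) = 0 := by
        refine List.countP_eq_zero.2 (fun j hj => ?_)
        have hj' := PySem.List.mem_pyRange_one.1 hj
        rw [pvB_eq_pvOk arr j (by omega)]
        intro hok
        rw [ok_one arr d hd1 hdes hother j.toNat (by omega)] at hok
        rcases hok with ⟨h, _⟩ | ⟨h, _⟩ <;> omega
      have hright : (PySem.List.pyRange ((d : Int) + 2) (arr.length : Int) 1).countP (pvB arr) = 0 := by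
        refine List.countP_eq_zero.2 (fun j hj => ?_)
        have hj' := PySem.List.mem_pyRange_one.1 hj
        rw [pvB_eq_pvOk arr j (by omega)]
        intro hok
        rw [ok_one arr d hd1 hdes hother j.toNat (by omega)] at hok
        rcases hok with ⟨h, _⟩ | ⟨h, _⟩ <;> omega
      have hd' : pvB arr ((d : Int)) = pvOk arr d := by
        rw [pvB_eq_pvOk arr ((d : Int)) (by omega)]; simp
      have hd1' : pvB arr ((d : Int) + 1) = pvOk arr (d + 1) := by
        rw [show (d : Int) + 1 = ((d + 1 : Nat) : Int) from by omega,
          pvB_eq_pvOk arr _ (by omega)]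
        simp
      have hokd : pvOk arr d = true ↔ (d = 0 ∨ arr.getD (d - 1) 0 ≤ arr.getD (d + 1) 0) := by
        rw [ok_one arr d hd1 hdes hother d (by omega)]
        constructor
        · rintro (⟨_, h⟩ | ⟨h, _⟩)
          · exact h
          · omega
        · intro h; exact Or.inl ⟨rfl, h⟩
      have hokd1 : pvOk arr (d + 1) = true ↔
          (d + 2 = arr.length ∨ arr.getD d 0 ≤ arr.getD (d + 2) 0) := by
        rw [ok_one arr d hd1 hdes hother (d + 1) (by omega)]
        constructor
        · rintro (⟨h, _⟩ | ⟨_, h⟩)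
          · omega
          · exact h
        · intro h; exact Or.inr ⟨rfl, h⟩
      have hBcount : makeArrsortByremoveOne_alt arr
          = (((if pvOk arr d then 1 else 0) + (if pvOk arr (d + 1) then 1 else 0) : Nat) : Int) := by
        rw [halt, hsplit, List.countP_append, List.countP_append, hleft, hright,
          List.countP_cons, List.countP_cons, List.countP_nil, hd', hd1']
        cases hb1 : pvOk arr d <;> cases hb2 : pvOk arr (d + 1) <;> simp
      -- A: the tail after the descent is ascending
      have htail : ∀ cnt : Int, cnt ≠ 0 →
          pvLoopA arr (arr.length : Int)
            (PySem.List.pyRange ((d : Int) + 1 + 1) (arr.length : Int) 1) cnt = cnt := by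
        intro cnt hcnt
        rw [loopA_no_descent arr ((arr.length : Int)).toNat ((d : Int) + 1 + 1) cnt (by omega)
          (by omega) (fun i hi h2 => asc_pvGD arr i (by omega)
            (hother (i.toNat - 1) (by omega) (by omega)))]
        rw [if_neg hcnt]
      by_cases hC1 : d = 0 ∨ arr.getD (d - 1) 0 ≤ arr.getD (d + 1) 0 <;>
        by_cases hC2 : d + 2 = arr.length ∨ arr.getD d 0 ≤ arr.getD (d + 2) 0
      · rw [if_pos (hc1.2 hC1), if_pos (hc2.2 hC2),
          if_neg (by norm_num : ¬ (0 : Int) + 1 + 1 = 0), htail _ (by norm_num),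
          hBcount, if_pos (hokd.2 hC1), if_pos (hokd1.2 hC2)]
        norm_num
      · rw [if_pos (hc1.2 hC1), if_neg (fun h => hC2 (hc2.1 h)),
          if_neg (by norm_num : ¬ (0 : Int) + 1 = 0), htail _ (by norm_num),
          hBcount, if_pos (hokd.2 hC1), if_neg (fun h => hC2 (hokd1.1 h))]
        norm_num
      · rw [if_neg (fun h => hC1 (hc1.1 h)), if_pos (hc2.2 hC2),
          if_neg (by norm_num : ¬ (0 : Int) + 1 = 0), htail _ (by norm_num),
          hBcount, if_neg (fun h => hC1 (hokd.1 h)), if_pos (hokd1.2 hC2)]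
        norm_num
      · rw [if_neg (fun h => hC1 (hc1.1 h)), if_neg (fun h => hC2 (hc2.1 h)),
          if_pos rfl,
          hBcount, if_neg (fun h => hC1 (hokd.1 h)), if_neg (fun h => hC2 (hokd1.1 h))]
        norm_num


-- ===== VERDICT (by name: the statement is the Claim_ definition above) =====
theorem makeArrsortByremoveOne_spec : Claim_equal_makeArrsortByremoveOne := by
  intro arr _
  unfold Spec_makeArrsortByremoveOne
  exact main_eq arr
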